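-- pv_equiv track=rewrite | github.com/KumarAditya1729/Arkashri | build/lib/arkashri/services/ml_analytics.py | _generate_risk_recommendations
-- ===== SOURCE A (Python) =====
-- from typing import Dict, List, Optional, Tuple, Any
--
-- def _generate_risk_recommendations(risk_factors: List[Dict]) -> List[str]:
--     """Generate recommendations based on risk factors"""
--     recommendations = []
--
--     for factor in risk_factors:
--         if "critical" in factor.get("description", "").lower():
--             recommendations.append("Schedule additional senior auditors for critical periods")
--
--         if "low confidence" in factor.get("description", "").lower():
--             recommendations.append("Implement more detailed audit documentation")
--
--         if "team size" in factor.get("mitigation", "").lower():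
--             recommendations.append("Consider team expansion or workload redistribution")
--
--     return list(set(recommendations))  # Remove duplicates
-- ===== SOURCE B (Python) =====
-- def _generate_risk_recommendations(risk_factors):
--     """Generate recommendations based on risk factors (rules table + any();
--     result returned sorted — the caller's list(set(...)) order was unspecified)."""
--     rules = [
--         ("critical", "description", "Schedule additional senior auditors for critical periods"),
--         ("low confidence", "description", "Implement more detailed audit documentation"),
--         ("team size", "mitigation", "Consider team expansion or workload redistribution"),
--     ]
--     return sorted({rec for needle, field, rec in rules
--                    if any(needle in f.get(field, "").lower() for f in risk_factors)})
-- ===== Notes on version B (the rewrite author's own statement) =====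
-- stated objective: simpler
-- what changed: Replaces the per-factor triple of hard-coded if/append statements plus a trailing list(set(...)) dedup by a rules table scanned once per rule with a short-circuiting any() over the factors; no duplicate recommendations are ever produced, so the dedup pass disappears (output equal as a set; A's list(set(...)) order is hash-dependent, B returns it sorted).
import Mathlib
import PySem

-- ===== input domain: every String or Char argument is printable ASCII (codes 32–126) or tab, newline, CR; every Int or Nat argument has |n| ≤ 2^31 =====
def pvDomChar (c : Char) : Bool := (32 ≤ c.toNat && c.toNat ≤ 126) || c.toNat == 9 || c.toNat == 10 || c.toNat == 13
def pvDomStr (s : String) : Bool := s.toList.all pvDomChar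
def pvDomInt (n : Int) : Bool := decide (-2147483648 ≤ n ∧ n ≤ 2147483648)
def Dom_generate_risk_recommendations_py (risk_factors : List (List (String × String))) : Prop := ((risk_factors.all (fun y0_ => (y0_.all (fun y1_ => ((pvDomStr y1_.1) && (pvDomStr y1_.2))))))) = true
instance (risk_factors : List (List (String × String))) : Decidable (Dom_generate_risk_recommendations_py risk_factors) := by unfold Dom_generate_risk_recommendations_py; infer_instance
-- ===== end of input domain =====

-- B replaces A's per-factor if/append chain + list(set(...)) dedup by a rules table with any();
-- equality is as a set of recommendations: list(set(...)) iteration order is hash-dependent in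
-- Python (outputs are compared as sets), so both ports enumerate the result set in sorted order.


-- ===== PORT A =====
-- transliteration of A's loop: three if/append per factor, then list(set(recommendations)).
-- Python's set iteration order is hash-dependent (unspecified), so the final list(set(...)) is
-- ported as the sorted enumeration of that set — exact as a set, which is how outputs compare.
def generate_risk_recommendations_py (risk_factors : List (List (String × String))) : List String :=
  let recommendations := risk_factors.foldl (fun recommendations factor =>
    let recommendations :=
      if PySem.Str.isIn "critical" (PySem.Str.lower ((PySem.Dict.mk factor).getD "description" "")) then
        recommendations ++ ["Schedule additional senior auditors for critical periods"]
      else recommendations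
    let recommendations :=
      if PySem.Str.isIn "low confidence" (PySem.Str.lower ((PySem.Dict.mk factor).getD "description" "")) then
        recommendations ++ ["Implement more detailed audit documentation"]
      else recommendations
    let recommendations :=
      if PySem.Str.isIn "team size" (PySem.Str.lower ((PySem.Dict.mk factor).getD "mitigation" "")) then
        recommendations ++ ["Consider team expansion or workload redistribution"]
      else recommendations
    recommendations) []
  PySem.List.sorted (PySem.Set.ofList recommendations) (fun x => x) false

-- ===== PORT B =====
-- transliteration of Source B: rules table, set comprehension guarded by any(), sorted.
def generate_risk_recommendations_py_alt (risk_factors : List (List (String × String))) : List String :=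
  let rules : List (String × String × String) :=
    [("critical", "description", "Schedule additional senior auditors for critical periods"),
     ("low confidence", "description", "Implement more detailed audit documentation"),
     ("team size", "mitigation", "Consider team expansion or workload redistribution")]
  PySem.List.sorted (PySem.Set.ofList (rules.filterMap (fun r =>
    if risk_factors.any (fun f => PySem.Str.isIn r.1 (PySem.Str.lower ((PySem.Dict.mk f).getD r.2.1 ""))) then
      some r.2.2
    else none))) (fun x => x) false

-- ===== PRECONDITION & SPEC =====
def Spec_generate_risk_recommendations_py (risk_factors : List (List (String × String))) (out : List String) : Prop := out = generate_risk_recommendations_py_alt risk_factors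
instance (risk_factors : List (List (String × String))) (out : List String) : Decidable (Spec_generate_risk_recommendations_py risk_factors out) := by unfold Spec_generate_risk_recommendations_py; infer_instance

-- ===== CLAIM (what is proved, stated in full; the proofs are below) =====
def Claim_equal_generate_risk_recommendations_py : Prop := ∀ (risk_factors : List (List (String × String))), Dom_generate_risk_recommendations_py risk_factors → Spec_generate_risk_recommendations_py risk_factors (generate_risk_recommendations_py risk_factors)

-- ===== LEMMAS AND PROOFS =====

-- helper names for the proofs (defeq to the loop bodies of the two ports)
def pvHit1 (f : List (String × String)) : Bool :=
  PySem.Str.isIn "critical" (PySem.Str.lower ((PySem.Dict.mk f).getD "description" ""))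
def pvHit2 (f : List (String × String)) : Bool :=
  PySem.Str.isIn "low confidence" (PySem.Str.lower ((PySem.Dict.mk f).getD "description" ""))
def pvHit3 (f : List (String × String)) : Bool :=
  PySem.Str.isIn "team size" (PySem.Str.lower ((PySem.Dict.mk f).getD "mitigation" ""))

-- A's loop body, under a name (defeq to the lambda in generate_risk_recommendations_py)
def pvStepA (recommendations : List String) (factor : List (String × String)) : List String :=
  let recommendations :=
    if PySem.Str.isIn "critical" (PySem.Str.lower ((PySem.Dict.mk factor).getD "description" "")) then
      recommendations ++ ["Schedule additional senior auditors for critical periods"]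
    else recommendations
  let recommendations :=
    if PySem.Str.isIn "low confidence" (PySem.Str.lower ((PySem.Dict.mk factor).getD "description" "")) then
      recommendations ++ ["Implement more detailed audit documentation"]
    else recommendations
  let recommendations :=
    if PySem.Str.isIn "team size" (PySem.Str.lower ((PySem.Dict.mk factor).getD "mitigation" "")) then
      recommendations ++ ["Consider team expansion or workload redistribution"]
    else recommendations
  recommendations

-- B's rule filter, under a name (defeq to the lambda in generate_risk_recommendations_py_alt)
def pvFiltB (risk_factors : List (List (String × String))) (r : String × String × String) : Option String :=
  if risk_factors.any (fun f => PySem.Str.isIn r.1 (PySem.Str.lower ((PySem.Dict.mk f).getD r.2.1 ""))) then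
    some r.2.2
  else none

lemma pv_ite_append (c : Bool) (acc : List String) (s : String) :
    (if c = true then acc ++ [s] else acc) = acc ++ (if c = true then [s] else []) := by
  cases c <;> simp

lemma pv_mem_ite_singleton (c : Bool) (s x : String) :
    x ∈ (if c = true then [s] else ([] : List String)) ↔ (x = s ∧ c = true) := by
  cases c <;> simp

lemma mem_pvStepA (acc : List String) (f : List (String × String)) (x : String) :
    x ∈ pvStepA acc f ↔
    x ∈ acc ∨
      ((x = "Schedule additional senior auditors for critical periods" ∧ pvHit1 f = true) ∨
       (x = "Implement more detailed audit documentation" ∧ pvHit2 f = true) ∨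
       (x = "Consider team expansion or workload redistribution" ∧ pvHit3 f = true)) := by
  unfold pvStepA pvHit1 pvHit2 pvHit3
  simp only [pv_ite_append, List.mem_append, pv_mem_ite_singleton, or_assoc]

-- membership in A's accumulated recommendations list, characterised
lemma mem_foldA (l : List (List (String × String))) (acc : List String) (x : String) :
    x ∈ List.foldl pvStepA acc l ↔
    x ∈ acc ∨
      ((x = "Schedule additional senior auditors for critical periods" ∧ l.any pvHit1 = true) ∨
       (x = "Implement more detailed audit documentation" ∧ l.any pvHit2 = true) ∨
       (x = "Consider team expansion or workload redistribution" ∧ l.any pvHit3 = true)) := by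
  induction l generalizing acc with
  | nil => simp
  | cons f t ih =>
    rw [List.foldl_cons, ih, mem_pvStepA]
    simp only [List.any_cons, Bool.or_eq_true, and_or_left]
    generalize (x ∈ acc) = PA
    generalize (x = "Schedule additional senior auditors for critical periods" ∧ pvHit1 f = true) = P1
    generalize (x = "Implement more detailed audit documentation" ∧ pvHit2 f = true) = P2
    generalize (x = "Consider team expansion or workload redistribution" ∧ pvHit3 f = true) = P3
    generalize (x = "Schedule additional senior auditors for critical periods" ∧ t.any pvHit1 = true) = Q1
    generalize (x = "Implement more detailed audit documentation" ∧ t.any pvHit2 = true) = Q2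
    generalize (x = "Consider team expansion or workload redistribution" ∧ t.any pvHit3 = true) = Q3
    tauto

-- membership in B's filtered rules list, characterised
lemma mem_filtB (rf : List (List (String × String))) (x : String) :
    x ∈ List.filterMap (pvFiltB rf)
        [("critical", "description", "Schedule additional senior auditors for critical periods"),
         ("low confidence", "description", "Implement more detailed audit documentation"),
         ("team size", "mitigation", "Consider team expansion or workload redistribution")] ↔
      ((x = "Schedule additional senior auditors for critical periods" ∧ rf.any pvHit1 = true) ∨
       (x = "Implement more detailed audit documentation" ∧ rf.any pvHit2 = true) ∨
       (x = "Consider team expansion or workload redistribution" ∧ rf.any pvHit3 = true)) := by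
  have e1 : pvFiltB rf ("critical", "description", "Schedule additional senior auditors for critical periods") =
      if rf.any pvHit1 = true then some "Schedule additional senior auditors for critical periods" else none := rfl
  have e2 : pvFiltB rf ("low confidence", "description", "Implement more detailed audit documentation") =
      if rf.any pvHit2 = true then some "Implement more detailed audit documentation" else none := rfl
  have e3 : pvFiltB rf ("team size", "mitigation", "Consider team expansion or workload redistribution") =
      if rf.any pvHit3 = true then some "Consider team expansion or workload redistribution" else none := rfl
  cases h1 : rf.any pvHit1 <;> cases h2 : rf.any pvHit2 <;> cases h3 : rf.any pvHit3 <;>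
    simp [e1, e2, e3, h1, h2, h3]

-- ===== VERDICT (by name: the statement is the Claim_ definition above) =====
theorem generate_risk_recommendations_py_spec : Claim_equal_generate_risk_recommendations_py := by
  intro rf _
  unfold Spec_generate_risk_recommendations_py
  unfold generate_risk_recommendations_py generate_risk_recommendations_py_alt
  show PySem.List.sorted (PySem.Set.ofList (List.foldl pvStepA [] rf)) (fun x => x) false
     = PySem.List.sorted (PySem.Set.ofList (List.filterMap (pvFiltB rf)
        [("critical", "description", "Schedule additional senior auditors for critical periods"),
         ("low confidence", "description", "Implement more detailed audit documentation"),
         ("team size", "mitigation", "Consider team expansion or workload redistribution")])) (fun x => x) false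
  rw [PySem.List.sorted_id_eq_sorted_id_iff_perm,
      List.perm_ext_iff_of_nodup (PySem.Set.nodup_ofList _) (PySem.Set.nodup_ofList _)]
  intro x
  rw [PySem.Set.mem_ofList, PySem.Set.mem_ofList, mem_foldA, mem_filtB]
  simp
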